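-- pv_equiv track=rewrite | github.com/yan-ren/programming-class | 2024-11-10.py | can_cover_all_houses
-- ===== SOURCE A (Python) =====
-- def can_cover_all_houses(H, houses, hose_length, k, start_index):
--     """
--     Check if all houses can be covered with k hydrants for a given hose length.
--
--     Parameters:
--     - H: Total number of houses.
--     - houses: Sorted list of house positions, duplicated to simulate circular arrangement.
--     - hose_length: Current hose length being tested.
--     - k: Number of available hydrants.
--     - start_index: Starting index in the houses list to begin placing hydrants.
--
--     Returns:
--     - True if all houses can be covered with k hydrants, False otherwise.
--     """
--     hose_length *= 2  # The hose covers distance in both directions from the hydrant.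
--     placed = 1  # Start with one hydrant placed.
--     start = houses[start_index]
--     hose_range = start + hose_length  # Maximum range the first hydrant can cover.
--
--     for h in houses[start_index:start_index + H]:
--         if h > hose_range:
--             # Need to place another hydrant as the current one can't cover this house.
--             hose_range = h + hose_length
--             placed += 1
--             if placed > k:
--                 # More hydrants are needed than available.
--                 return False
--     return True
-- ===== SOURCE B (Python) =====
-- def _bisect_right(a, x, lo, hi):
--     """Hand-written bisect_right: first index in [lo, hi) with a[idx] > x (hi if none)."""
--     while lo < hi:
--         mid = (lo + hi) // 2
--         if x < a[mid]:
--             hi = mid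
--         else:
--             lo = mid + 1
--     return lo
--
--
-- def can_cover_all_houses(H, houses, hose_length, k, start_index):
--     """Binary-search jump to the next uncovered house instead of scanning every house."""
--     reach = hose_length * 2
--     start = houses[start_index]
--     window = houses[start_index:start_index + H]
--     n = len(window)
--     placed = 1
--     i = _bisect_right(window, start + reach, 0, n)
--     while i < n:
--         placed += 1
--         if placed > k:
--             return False
--         i = _bisect_right(window, window[i] + reach, i + 1, n)
--     return True
-- ===== Notes on version B (the rewrite author's own statement) =====
-- stated objective: alternative
-- what changed: B replaces A's linear scan over every house in the window by a hand-written bisect_right binary search that jumps directly to the next uncovered house, doing one O(log H) search per placed hydrant instead of visiting each house.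
-- outside the precondition, e.g. on can_cover_all_houses(2, [3, -2], -2, 1, 0): A returns False, B returns True
import Mathlib
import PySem

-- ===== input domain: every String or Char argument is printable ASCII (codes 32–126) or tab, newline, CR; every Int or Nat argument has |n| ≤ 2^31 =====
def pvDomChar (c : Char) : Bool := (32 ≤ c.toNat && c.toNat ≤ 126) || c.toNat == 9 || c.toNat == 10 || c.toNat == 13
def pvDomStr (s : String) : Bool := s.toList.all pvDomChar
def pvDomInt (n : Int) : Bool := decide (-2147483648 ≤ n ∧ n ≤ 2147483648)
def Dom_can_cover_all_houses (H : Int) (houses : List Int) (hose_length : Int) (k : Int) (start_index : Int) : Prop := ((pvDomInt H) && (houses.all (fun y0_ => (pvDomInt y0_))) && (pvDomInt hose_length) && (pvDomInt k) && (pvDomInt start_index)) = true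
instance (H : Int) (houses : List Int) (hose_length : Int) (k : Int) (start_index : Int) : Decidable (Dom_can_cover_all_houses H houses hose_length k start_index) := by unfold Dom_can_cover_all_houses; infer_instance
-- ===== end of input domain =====

-- B replaces A's linear scan over the window by a binary-search (bisect_right) jump
-- to the next uncovered house; equality is claimed on sorted windows (see Pre_).

-- ===== PORT A =====
-- A's for-loop over houses[start_index:start_index+H] with early return False
def loopA (t : List Int) (hose_range : Int) (placed : Int) (L k : Int) : Bool :=
  match t with
  | [] => true
  | h :: rest =>
    if h > hose_range then
      if placed + 1 > k then false
      else loopA rest (h + L) (placed + 1) L k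
    else loopA rest hose_range placed L k

def can_cover_all_houses (H : Int) (houses : List Int) (hose_length : Int) (k : Int) (start_index : Int) : Bool :=
  let L := hose_length * 2
  match PySem.List.pyGet? houses start_index with
  | none => false  -- Python raises IndexError here; excluded by Pre_
  | some start =>
    loopA (PySem.List.slice houses (some start_index) (some (start_index + H))) (start + L) 1 L k

-- ===== PORT B =====
-- hand-written bisect_right of Source B: first index in [lo,hi) with x < a[idx], else hi.
-- The while loop is ported as structural recursion on a fuel that bounds the
-- remaining interval length (a totality guard only; it does not change the computation).
def bisectGo (a : List Int) (x : Int) : Nat → Nat → Nat → Nat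
  | 0, lo, _ => lo
  | fuel + 1, lo, hi =>
    if lo < hi then
      let mid := (lo + hi) / 2
      if x < a.getD mid 0 then bisectGo a x fuel lo mid
      else bisectGo a x fuel (mid + 1) hi
    else lo

def bisectRight (a : List Int) (x : Int) (lo hi : Nat) : Nat :=
  bisectGo a x (hi - lo) lo hi

-- Source B's while loop: i is the index of the next uncovered house; fuel bounds the
-- number of remaining houses (again only a totality guard).
def loopBGo (w : List Int) (L k : Int) : Nat → Int → Nat → Bool
  | 0, _, _ => true
  | fuel + 1, placed, i =>
    if i < w.length then
      if placed + 1 > k then false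
      else loopBGo w L k fuel (placed + 1) (bisectRight w (w.getD i 0 + L) (i + 1) w.length)
    else true

def loopB (w : List Int) (L k : Int) (placed : Int) (i : Nat) : Bool :=
  loopBGo w L k (w.length - i) placed i

def can_cover_all_houses_alt (H : Int) (houses : List Int) (hose_length : Int) (k : Int) (start_index : Int) : Bool :=
  let reach := hose_length * 2
  match PySem.List.pyGet? houses start_index with
  | none => false  -- Source B raises IndexError here too; excluded by Pre_
  | some start =>
    let w := PySem.List.slice houses (some start_index) (some (start_index + H))
    loopB w reach k 1 (bisectRight w (start + reach) 0 w.length)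

-- ===== PRECONDITION & SPEC =====
-- Pre_ excludes (i) start_index out of range, where A raises IndexError, and
-- (ii) inputs whose selected window houses[start_index:start_index+H] is not sorted
-- non-decreasing: the docstring requires a sorted houses list and B's binary search
-- relies on it, while A still returns a (meaningless) value on unsorted input.
def Pre_can_cover_all_houses (H : Int) (houses : List Int) (hose_length : Int) (k : Int) (start_index : Int) : Prop :=
  (PySem.List.pyGet? houses start_index).isSome = true ∧
  List.Pairwise (· ≤ ·) (PySem.List.slice houses (some start_index) (some (start_index + H)))

instance (H : Int) (houses : List Int) (hose_length : Int) (k : Int) (start_index : Int) : Decidable (Pre_can_cover_all_houses H houses hose_length k start_index) := by unfold Pre_can_cover_all_houses; infer_instance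

def pvWitness_can_cover_all_houses : Int × List Int × Int × Int × Int := (3, [1, 4, 6], 1, 2, 0)

def Spec_can_cover_all_houses (H : Int) (houses : List Int) (hose_length : Int) (k : Int) (start_index : Int) (out : Bool) : Prop := out = can_cover_all_houses_alt H houses hose_length k start_index
instance (H : Int) (houses : List Int) (hose_length : Int) (k : Int) (start_index : Int) (out : Bool) : Decidable (Spec_can_cover_all_houses H houses hose_length k start_index out) := by unfold Spec_can_cover_all_houses; infer_instance

-- ===== CLAIM (what is proved, stated in full; the proofs are below) =====
def Claim_equal_can_cover_all_houses : Prop := ∀ (H : Int) (houses : List Int) (hose_length : Int) (k : Int) (start_index : Int), Dom_can_cover_all_houses H houses hose_length k start_index → Pre_can_cover_all_houses H houses hose_length k start_index → Spec_can_cover_all_houses H houses hose_length k start_index (can_cover_all_houses H houses hose_length k start_index)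

-- ===== LEMMAS AND PROOFS =====

theorem sorted_getD_mono (w : List Int) (hs : List.Pairwise (· ≤ ·) w)
    (i j : Nat) (hij : i ≤ j) (hj : j < w.length) :
    w.getD i 0 ≤ w.getD j 0 := by
  rcases Nat.lt_or_ge i j with h | h
  · rw [List.getD_eq_getElem w 0 (Nat.lt_of_lt_of_le h (Nat.le_of_lt hj)),
      List.getD_eq_getElem w 0 hj]
    exact List.pairwise_iff_getElem.mp hs i j _ _ h
  · have : i = j := Nat.le_antisymm hij h
    subst this; exact le_refl _

theorem bisectGo_lo_le (a : List Int) (x : Int) :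
    ∀ fuel lo hi : Nat, lo ≤ bisectGo a x fuel lo hi := by
  intro fuel
  induction fuel with
  | zero => intro lo hi; exact le_refl lo
  | succ n ih =>
    intro lo hi
    rw [bisectGo]
    by_cases h : lo < hi
    · rw [if_pos h]
      by_cases hx : x < a.getD ((lo + hi) / 2) 0
      · rw [if_pos hx]; exact ih lo ((lo + hi) / 2)
      · rw [if_neg hx]
        have := ih ((lo + hi) / 2 + 1) hi
        omega
    · rw [if_neg h]

theorem bisectRight_lo_le (a : List Int) (x : Int) (lo hi : Nat) :
    lo ≤ bisectRight a x lo hi :=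
  bisectGo_lo_le a x (hi - lo) lo hi

theorem bisectGo_spec (a : List Int) (x : Int)
    (hsort : List.Pairwise (· ≤ ·) a) :
    ∀ fuel lo hi : Nat, hi - lo ≤ fuel → lo ≤ hi → hi ≤ a.length →
    (lo ≤ bisectGo a x fuel lo hi ∧ bisectGo a x fuel lo hi ≤ hi ∧
     (∀ j, lo ≤ j → j < bisectGo a x fuel lo hi → a.getD j 0 ≤ x) ∧
     (∀ j, bisectGo a x fuel lo hi ≤ j → j < hi → x < a.getD j 0)) := by
  intro fuel
  induction fuel with
  | zero =>
    intro lo hi hf hle hhi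
    have : lo = hi := by omega
    subst this
    rw [bisectGo]
    exact ⟨le_refl _, le_refl _, by omega, by omega⟩
  | succ n ih =>
    intro lo hi hf hle hhi
    rw [bisectGo]
    by_cases h : lo < hi
    · rw [if_pos h]
      simp only
      by_cases hx : x < a.getD ((lo + hi) / 2) 0
      · rw [if_pos hx]
        obtain ⟨h1, h2, h3, h4⟩ := ih lo ((lo + hi) / 2) (by omega) (by omega) (by omega)
        refine ⟨h1, by omega, h3, ?_⟩
        intro j hj1 hj2
        rcases Nat.lt_or_ge j ((lo + hi) / 2) with hc | hc
        · exact h4 j hj1 hc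
        · calc x < a.getD ((lo + hi) / 2) 0 := hx
            _ ≤ a.getD j 0 := sorted_getD_mono a hsort _ j hc (by omega)
      · rw [if_neg hx]
        obtain ⟨h1, h2, h3, h4⟩ := ih ((lo + hi) / 2 + 1) hi (by omega) (by omega) hhi
        refine ⟨by omega, h2, ?_, h4⟩
        intro j hj1 hj2
        rcases Nat.lt_or_ge j ((lo + hi) / 2 + 1) with hc | hc
        · calc a.getD j 0 ≤ a.getD ((lo + hi) / 2) 0 :=
              sorted_getD_mono a hsort j _ (by omega) (by omega)
            _ ≤ x := not_lt.mp hx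
        · exact h3 j hc hj2
    · rw [if_neg h]
      exact ⟨le_refl _, hle, by omega, by omega⟩

theorem bisect_spec (a : List Int) (x : Int) (lo hi : Nat)
    (hsort : List.Pairwise (· ≤ ·) a) (hle : lo ≤ hi) (hhi : hi ≤ a.length) :
    (lo ≤ bisectRight a x lo hi ∧ bisectRight a x lo hi ≤ hi ∧
     (∀ j, lo ≤ j → j < bisectRight a x lo hi → a.getD j 0 ≤ x) ∧
     (∀ j, bisectRight a x lo hi ≤ j → j < hi → x < a.getD j 0)) :=
  bisectGo_spec a x hsort (hi - lo) lo hi (le_refl _) hle hhi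

-- loopBGo does not depend on the fuel as long as the fuel is sufficient
theorem loopBGo_fuel (w : List Int) (L k : Int) :
    ∀ f1 f2 : Nat, ∀ p : Int, ∀ i : Nat, w.length - i ≤ f1 → w.length - i ≤ f2 →
    loopBGo w L k f1 p i = loopBGo w L k f2 p i := by
  intro f1
  induction f1 with
  | zero =>
    intro f2 p i h1 h2
    have hi : ¬ i < w.length := by omega
    cases f2 with
    | zero => rfl
    | succ m => rw [loopBGo, loopBGo, if_neg hi]
  | succ n ih =>
    intro f2 p i h1 h2
    by_cases hi : i < w.length
    · cases f2 with
      | zero => omega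
      | succ m =>
        rw [loopBGo, loopBGo, if_pos hi, if_pos hi]
        by_cases hk : p + 1 > k
        · rw [if_pos hk, if_pos hk]
        · rw [if_neg hk, if_neg hk]
          have hlo := bisectRight_lo_le w (w.getD i 0 + L) (i + 1) w.length
          exact ih m (p + 1) _ (by omega) (by omega)
    · cases f2 with
      | zero => rw [loopBGo, loopBGo, if_neg hi]
      | succ m => rw [loopBGo, loopBGo, if_neg hi, if_neg hi]

-- A's loop ignores houses already in range: skip a block of covered houses
theorem loopA_skip (w : List Int) (r p L k : Int) :
    ∀ d i j : Nat, j - i = d → i ≤ j → j ≤ w.length →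
    (∀ t, i ≤ t → t < j → w.getD t 0 ≤ r) →
    loopA (w.drop i) r p L k = loopA (w.drop j) r p L k := by
  intro d
  induction d with
  | zero =>
    intro i j h1 h2 _ _
    have : i = j := by omega
    subst this; rfl
  | succ n ih =>
    intro i j h1 h2 h3 h4
    have hi_lt : i < w.length := by omega
    have hle : w[i] ≤ r := by
      have := h4 i (le_refl i) (by omega)
      rwa [List.getD_eq_getElem w 0 hi_lt] at this
    rw [List.drop_eq_getElem_cons hi_lt]
    show loopA (w[i] :: w.drop (i + 1)) r p L k = _
    rw [loopA, if_neg (not_lt.mpr hle)]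
    exact ih (i + 1) j (by omega) (by omega) h3 (fun t ht1 ht2 => h4 t (by omega) ht2)

theorem bridge (w : List Int) (hs : List.Pairwise (· ≤ ·) w) (L k : Int) :
    ∀ fuel i : Nat, w.length - i ≤ fuel → i ≤ w.length → ∀ r p : Int,
    loopA (w.drop i) r p L k = loopB w L k p (bisectRight w r i w.length) := by
  intro fuel
  induction fuel with
  | zero =>
    intro i hf hi r p
    have : i = w.length := by omega
    subst this
    have hj : bisectRight w r w.length w.length = w.length := by
      unfold bisectRight bisectGo; simp
    rw [hj, List.drop_length, loopA]
    unfold loopB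
    simp only [Nat.sub_self]
    rw [loopBGo]
  | succ n ih =>
    intro i hf hi r p
    obtain ⟨hb1, hb2, hb3, hb4⟩ := bisect_spec w r i w.length hs hi (le_refl _)
    set j := bisectRight w r i w.length with hj_def
    have e1 : loopA (w.drop i) r p L k = loopA (w.drop j) r p L k :=
      loopA_skip w r p L k (j - i) i j rfl hb1 hb2 hb3
    rw [e1]
    by_cases hj : j < w.length
    · have hgt : r < w[j] := by
        have := hb4 j (le_refl j) hj
        rwa [List.getD_eq_getElem w 0 hj] at this
      rw [List.drop_eq_getElem_cons hj]
      rw [loopA, if_pos hgt]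
      unfold loopB
      have hfj : w.length - j = (w.length - j - 1) + 1 := by omega
      rw [hfj, loopBGo, if_pos hj]
      by_cases hk : p + 1 > k
      · rw [if_pos hk, if_pos hk]
      · rw [if_neg hk, if_neg hk]
        have hstep := ih (j + 1) (by omega) (by omega) (w[j] + L) (p + 1)
        rw [List.getD_eq_getElem w 0 hj]
        set j2 := bisectRight w (w[j] + L) (j + 1) w.length with hj2_def
        have hlo2 := bisectRight_lo_le w (w[j] + L) (j + 1) w.length
        rw [hstep]
        unfold loopB
        exact loopBGo_fuel w L k (w.length - j2) (w.length - j - 1) (p + 1) j2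
          (le_refl _) (by omega)
    · have hj_eq : j = w.length := by omega
      rw [hj_eq, List.drop_length, loopA]
      unfold loopB
      simp only [Nat.sub_self]
      rw [loopBGo]

-- ===== VERDICT (by name: the statement is the Claim_ definition above) =====
theorem can_cover_all_houses_spec : Claim_equal_can_cover_all_houses := by
  intro H houses hose_length k start_index _ hpre
  obtain ⟨hsome, hsort⟩ := hpre
  obtain ⟨start, hstart⟩ := Option.isSome_iff_exists.mp hsome
  unfold Spec_can_cover_all_houses can_cover_all_houses can_cover_all_houses_alt
  rw [hstart]
  simp only
  have := bridge (PySem.List.slice houses (some start_index) (some (start_index + H)))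
    hsort (hose_length * 2) k
    (PySem.List.slice houses (some start_index) (some (start_index + H))).length 0
    (by omega) (Nat.zero_le _) (start + hose_length * 2) 1
  rwa [List.drop_zero] at this
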